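-- pv_equiv track=rewrite | github.com/parfenovak/Modern-IT-problems | 10.py | swap_min_max_in_rows
-- ===== SOURCE A (Python) =====
-- def swap_min_max_in_rows(matrix):
--     for row in matrix:
--         min_val = min(row)
--         max_val = max(row)
--         min_index = row.index(min_val)
--         max_index = row.index(max_val)
--         row[0], row[min_index] = row[min_index], row[0]
--         row[-1], row[max_index] = row[max_index], row[-1]
--     return matrix
-- ===== SOURCE B (Python) =====
-- # Single pure pass per row (tracking min/max with first-occurrence indices) instead of
-- # A's four builtin scans; builds new rows rather than mutating in place (return value only).
-- def _fix_row(row):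
--     mn = mx = row[0]
--     mi = xi = 0
--     pos = 1
--     for v in row[1:]:
--         if v < mn:
--             mn, mi = v, pos
--         if v > mx:
--             mx, xi = v, pos
--         pos += 1
--     out = row[:]
--     out[0], out[mi] = out[mi], out[0]
--     out[-1], out[xi] = out[xi], out[-1]
--     return out
--
-- def swap_min_max_in_rows(matrix):
--     return [_fix_row(row) for row in matrix]
-- ===== Notes on version B (the rewrite author's own statement) =====
-- stated objective: alternative
-- what changed: Replaces A's four builtin scans per row (min, max, two .index calls) and in-place tuple swaps with one explicit pass per row tracking the running min/max together with their first-occurrence indices, then building a new swapped row from a copy; A mutates the matrix in place, B is pure, equivalence is about the return value.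
import Mathlib
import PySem

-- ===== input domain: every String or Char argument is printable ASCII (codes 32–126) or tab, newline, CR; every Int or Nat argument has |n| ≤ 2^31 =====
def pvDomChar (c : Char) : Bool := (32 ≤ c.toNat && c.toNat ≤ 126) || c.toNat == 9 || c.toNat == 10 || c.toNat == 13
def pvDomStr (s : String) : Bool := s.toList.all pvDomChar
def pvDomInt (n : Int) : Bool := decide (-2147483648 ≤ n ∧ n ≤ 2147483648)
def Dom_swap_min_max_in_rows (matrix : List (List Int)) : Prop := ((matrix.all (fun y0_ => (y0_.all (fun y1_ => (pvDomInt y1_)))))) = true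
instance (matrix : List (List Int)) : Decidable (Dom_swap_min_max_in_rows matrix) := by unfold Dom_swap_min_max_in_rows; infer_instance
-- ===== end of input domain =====

-- B is a single explicit pass per row (running min/max with first-occurrence indices) where A
-- makes four builtin scans; A mutates the rows in place, B builds new rows — the equivalence
-- proved here is about the RETURN value only.

-- ===== PORT A =====
-- min(row)/max(row) → PySem.List.min?/max? (ValueError on [] = none, excluded by Pre_);
-- row.index(v) → PySem.List.index? (always finds, since v ∈ row); the tuple swaps capture the
-- right-hand values first and then assign left to right, which for in-range distinct-or-equal
-- indices is exactly the two `set`s below; row[-1] is index length-1 on a nonempty row.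
def swap_min_max_in_rows (matrix : List (List Int)) : List (List Int) :=
  matrix.map (fun row =>
    match PySem.List.min? row (fun y => y), PySem.List.max? row (fun y => y) with
    | some min_val, some max_val =>
      let min_index := (PySem.List.index? row min_val).getD 0
      let max_index := (PySem.List.index? row max_val).getD 0
      let r1 := (row.set 0 (row.getD min_index 0)).set min_index (row.getD 0 0)
      (r1.set (r1.length - 1) (r1.getD max_index 0)).set max_index (r1.getD (r1.length - 1) 0)
    | _, _ => row)   -- unreachable under Pre_ (every row nonempty)

-- ===== PORT B =====
-- the 'for v in row[1:]' loop of Source B: state (mn, mi, mx, xi, pos)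
def pvScan : List Int → Int → Nat → Int → Nat → Nat → Int × Nat × Int × Nat
  | [], mn, mi, mx, xi, _ => (mn, mi, mx, xi)
  | v :: rest, mn, mi, mx, xi, pos =>
    pvScan rest (if v < mn then v else mn) (if v < mn then pos else mi)
      (if v > mx then v else mx) (if v > mx then pos else xi) (pos + 1)

def pvFixRow (row : List Int) : List Int :=
  match row with
  | [] => []   -- Source B raises IndexError here (row[0]); excluded by Pre_
  | h :: t =>
    let s := pvScan t h 0 h 0 1
    let mi := s.2.1
    let xi := s.2.2.2
    let out := row        -- out = row[:]
    let out1 := (out.set 0 (out.getD mi 0)).set mi (out.getD 0 0)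
    (out1.set (out1.length - 1) (out1.getD xi 0)).set xi (out1.getD (out1.length - 1) 0)

def swap_min_max_in_rows_alt (matrix : List (List Int)) : List (List Int) :=
  matrix.map pvFixRow

-- ===== PRECONDITION & SPEC =====
-- A raises ValueError (min of empty sequence) on any empty row; exactly those inputs are excluded.
def Pre_swap_min_max_in_rows (matrix : List (List Int)) : Prop :=
  ∀ row ∈ matrix, row ≠ []
instance (matrix : List (List Int)) : Decidable (Pre_swap_min_max_in_rows matrix) := by
  unfold Pre_swap_min_max_in_rows; infer_instance
def pvWitness_swap_min_max_in_rows : List (List Int) := [[3, 1], [5, 1, 4, 1, 5, 2], [7]]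

def Spec_swap_min_max_in_rows (matrix : List (List Int)) (out : List (List Int)) : Prop := out = swap_min_max_in_rows_alt matrix
instance (matrix : List (List Int)) (out : List (List Int)) : Decidable (Spec_swap_min_max_in_rows matrix out) := by unfold Spec_swap_min_max_in_rows; infer_instance

-- ===== CLAIM (what is proved, stated in full; the proofs are below) =====
def Claim_equal_swap_min_max_in_rows : Prop := ∀ (matrix : List (List Int)), Dom_swap_min_max_in_rows matrix → Pre_swap_min_max_in_rows matrix → Spec_swap_min_max_in_rows matrix (swap_min_max_in_rows matrix)

-- ===== LEMMAS AND PROOFS =====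

theorem pvIdxOf?_of_mem (t : List Int) (m : Int) (h : m ∈ t) :
    List.idxOf? m t = some (t.idxOf m) := by
  induction t with
  | nil => cases h
  | cons a rest ih =>
    by_cases hav : a = m
    · subst hav; simp [List.idxOf?_cons]
    · have hm : m ∈ rest := by
        rcases List.mem_cons.mp h with h' | h'
        · exact absurd h'.symm hav
        · exact h'
      simp [List.idxOf?_cons, hav, ih hm, beq_iff_eq]

-- the loop invariant of Source B's single pass
theorem pvScan_eq (t : List Int) (mn mx : Int) (mi xi pos : Nat) :
    pvScan t mn mi mx xi pos =
      (t.foldl min mn,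
       (if t.foldl min mn < mn then t.idxOf (t.foldl min mn) + pos else mi),
       t.foldl max mx,
       (if mx < t.foldl max mx then t.idxOf (t.foldl max mx) + pos else xi)) := by
  induction t generalizing mn mi mx xi pos with
  | nil => simp [pvScan]
  | cons v rest ih =>
    have hmn : (if v < mn then v else mn) = min mn v := by
      rw [Int.min_def]; split_ifs <;> omega
    have hmx : (if v > mx then v else mx) = max mx v := by
      rw [Int.max_def]; split_ifs <;> omega
    simp only [pvScan, List.foldl_cons, hmn, hmx, ih]
    have hminle := PySem.List.foldl_min_le rest (min mn v)
    have hmaxle := PySem.List.le_foldl_max rest (max mx v)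
    simp only [Prod.mk.injEq]
    refine ⟨trivial, ?_, trivial, ?_⟩
    · -- min-index component
      by_cases h1 : v < mn
      · have hmn' : min mn v = v := by rw [Int.min_def]; omega
        rw [hmn']
        by_cases h2 : rest.foldl min v < v
        · have hne : v ≠ rest.foldl min v := by omega
          have h3 : rest.foldl min v < mn := by omega
          simp [h2, h3, hne]
          omega
        · have heq : rest.foldl min v = v := by rw [hmn'] at hminle; omega
          simp [heq, h1]
      · have hmn' : min mn v = mn := by rw [Int.min_def]; omega
        rw [hmn']
        by_cases h2 : rest.foldl min mn < mn
        · have hne : v ≠ rest.foldl min mn := by omega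
          simp [h2, hne]
          omega
        · simp [h1, h2]
    · -- max-index component
      by_cases h1 : v > mx
      · have hmx' : max mx v = v := by rw [Int.max_def]; omega
        rw [hmx']
        by_cases h2 : v < rest.foldl max v
        · have hne : v ≠ rest.foldl max v := by omega
          have h3 : mx < rest.foldl max v := by omega
          simp [h2, h3, hne]
          omega
        · have heq : rest.foldl max v = v := by rw [hmx'] at hmaxle; omega
          simp [heq, h1]
      · have hmx' : max mx v = mx := by rw [Int.max_def]; omega
        rw [hmx']
        by_cases h2 : mx < rest.foldl max mx
        · have hne : v ≠ rest.foldl max mx := by omega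
          simp [h2, hne]
          omega
        · simp [h1, h2]

-- A's index of the minimum equals B's tracked index
theorem pvIndex?_min (h : Int) (t : List Int) :
    (PySem.List.index? (h :: t) (t.foldl min h)).getD 0 =
      (if t.foldl min h < h then t.idxOf (t.foldl min h) + 1 else 0) := by
  have hle := PySem.List.foldl_min_le t h
  by_cases hlt : t.foldl min h < h
  · have hne : h ≠ t.foldl min h := by omega
    have hmem : t.foldl min h ∈ t := by
      rcases PySem.List.foldl_min_mem t h with he | hm
      · omega
      · exact hm
    rw [PySem.List.index?_cons_of_ne t hne]
    simp [PySem.List.index?_eq_idxOf?, pvIdxOf?_of_mem t _ hmem, hlt]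
  · have heq : t.foldl min h = h := by omega
    rw [heq, PySem.List.index?_cons_self h t]
    simp

theorem pvIndex?_max (h : Int) (t : List Int) :
    (PySem.List.index? (h :: t) (t.foldl max h)).getD 0 =
      (if h < t.foldl max h then t.idxOf (t.foldl max h) + 1 else 0) := by
  have hle := PySem.List.le_foldl_max t h
  by_cases hlt : h < t.foldl max h
  · have hne : h ≠ t.foldl max h := by omega
    have hmem : t.foldl max h ∈ t := by
      rcases PySem.List.foldl_max_mem t h with he | hm
      · omega
      · exact hm
    rw [PySem.List.index?_cons_of_ne t hne]
    simp [PySem.List.index?_eq_idxOf?, pvIdxOf?_of_mem t _ hmem, hlt]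
  · have heq : t.foldl max h = h := by omega
    rw [heq, PySem.List.index?_cons_self h t]
    simp

theorem pvRow_eq (row : List Int) (hne : row ≠ []) :
    (match PySem.List.min? row (fun y => y), PySem.List.max? row (fun y => y) with
      | some min_val, some max_val =>
        let min_index := (PySem.List.index? row min_val).getD 0
        let max_index := (PySem.List.index? row max_val).getD 0
        let r1 := (row.set 0 (row.getD min_index 0)).set min_index (row.getD 0 0)
        (r1.set (r1.length - 1) (r1.getD max_index 0)).set max_index (r1.getD (r1.length - 1) 0)
      | _, _ => row) = pvFixRow row := by
  match row with
  | [] => exact absurd rfl hne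
  | h :: t =>
    rw [PySem.List.min?_id_cons, PySem.List.max?_id_cons]
    simp only [pvFixRow, pvScan_eq]
    rw [pvIndex?_min, pvIndex?_max]

-- ===== VERDICT (by name: the statement is the Claim_ definition above) =====
theorem swap_min_max_in_rows_spec : Claim_equal_swap_min_max_in_rows := by
  intro matrix _hdom hpre
  unfold Spec_swap_min_max_in_rows swap_min_max_in_rows swap_min_max_in_rows_alt
  exact List.map_congr_left (fun row hrow => pvRow_eq row (hpre row hrow))
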